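-- pv_equiv track=rewrite | github.com/ps-nithin/pyrebel_old | pynvrebel.py | n_inflections
-- ===== SOURCE A (Python) =====
-- def n_inflections(pd_list_ip):
--     pat=list()
--     pd_list=pd_list_ip
--     """
--     for i in pd_list_ip:
--         if abs(i)<0.01:
--             pd_list.append(0)
--         else:
--             pd_list.append(i)
--     """
--     for i in range(1,len(pd_list)):
--         prev_pd=pd_list[i-1]
--         cur_pd=pd_list[i]
--         if prev_pd!=0 and cur_pd==0:
--             pat.append(i)
--         elif prev_pd==0 and cur_pd!=0:
--             pat.append(i)
--         elif prev_pd<0 and cur_pd>0: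
--             pat.append(i)
--         elif prev_pd>0 and cur_pd<0:
--             pat.append(i)
--     return pat
-- ===== SOURCE B (Python) =====
-- def n_inflections(pd_list_ip):
--     # Run-skipping: jump over each maximal run of equal sign; every run
--     # boundary (start of the next run) is exactly one inflection index.
--     def sign(v):
--         return 0 if v == 0 else (1 if v > 0 else -1)
--     n = len(pd_list_ip)
--     out = []
--     i = 0
--     while i < n:
--         s = sign(pd_list_ip[i])
--         i += 1
--         while i < n and sign(pd_list_ip[i]) == s:
--             i += 1
--         if i < n:
--             out.append(i)
--     return out
-- ===== Notes on version B (the rewrite author's own statement) =====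
-- stated objective: alternative
-- what changed: Instead of A's element-by-element pass testing a four-way branch on every adjacent pair, B skips over maximal runs of equal sign with a nested run-advancing loop and records each run boundary directly, so no per-pair comparison or branch table is evaluated off run boundaries.
import Mathlib
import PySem

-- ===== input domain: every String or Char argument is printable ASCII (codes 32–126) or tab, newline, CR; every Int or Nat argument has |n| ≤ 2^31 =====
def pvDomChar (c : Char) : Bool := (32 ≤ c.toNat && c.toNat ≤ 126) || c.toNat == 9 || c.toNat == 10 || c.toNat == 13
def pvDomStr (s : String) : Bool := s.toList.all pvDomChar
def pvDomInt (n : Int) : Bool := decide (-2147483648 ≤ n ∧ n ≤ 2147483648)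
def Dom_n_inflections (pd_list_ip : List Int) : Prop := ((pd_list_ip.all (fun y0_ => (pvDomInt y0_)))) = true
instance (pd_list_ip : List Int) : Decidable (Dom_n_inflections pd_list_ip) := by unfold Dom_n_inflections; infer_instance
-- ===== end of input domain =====

-- B replaces the per-pair four-way branch by a run-skipping loop that records run boundaries (alternative decomposition, same cost).

-- ===== PORT A =====
def n_inflections (pd_list_ip : List Int) : List Int :=
  -- pat = []; pd_list = pd_list_ip; for i in range(1, len(pd_list)): …
  (PySem.List.pyRange 1 pd_list_ip.length 1).foldl (fun pat i =>
    let prev_pd := PySem.List.pyGetD pd_list_ip (i - 1) 0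
    let cur_pd := PySem.List.pyGetD pd_list_ip i 0
    if prev_pd ≠ 0 ∧ cur_pd = 0 then pat ++ [i]
    else if prev_pd = 0 ∧ cur_pd ≠ 0 then pat ++ [i]
    else if prev_pd < 0 ∧ cur_pd > 0 then pat ++ [i]
    else if prev_pd > 0 ∧ cur_pd < 0 then pat ++ [i]
    else pat) []

-- ===== PORT B =====
-- def sign(v): return 0 if v == 0 else (1 if v > 0 else -1)
def pvSign (v : Int) : Int := if v = 0 then 0 else if v > 0 then 1 else -1

-- inner while: 'while i < n and sign(pd_list_ip[i]) == s: i += 1'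
def pvSkip (xs : List Int) (s : Int) (i : Nat) : Nat :=
  if i < xs.length ∧ pvSign (xs.getD i 0) = s then pvSkip xs s (i + 1) else i
termination_by xs.length - i
decreasing_by omega

theorem pvSkip_le (xs : List Int) (s : Int) (i : Nat) : i ≤ pvSkip xs s i := by
  fun_induction pvSkip with
  | case1 i h ih => omega
  | case2 i h => omega

-- outer while: read the run's sign, skip the run, record the boundary if any
def pvGo (xs : List Int) (i : Nat) : List Int :=
  if h : i < xs.length then
    let s := pvSign (xs.getD i 0)
    let j := pvSkip xs s (i + 1)
    if h2 : j < xs.length then (j : Int) :: pvGo xs j else []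
  else []
termination_by xs.length - i
decreasing_by
  have := pvSkip_le xs (pvSign (xs.getD i 0)) (i + 1)
  omega

def n_inflections_alt (pd_list_ip : List Int) : List Int :=
  pvGo pd_list_ip 0

-- ===== PRECONDITION & SPEC =====
def Spec_n_inflections (pd_list_ip : List Int) (out : List Int) : Prop := out = n_inflections_alt pd_list_ip
instance (pd_list_ip : List Int) (out : List Int) : Decidable (Spec_n_inflections pd_list_ip out) := by unfold Spec_n_inflections; infer_instance

-- ===== CLAIM (what is proved, stated in full; the proofs are below) =====
def Claim_equal_n_inflections : Prop := ∀ (pd_list_ip : List Int), Dom_n_inflections pd_list_ip → Spec_n_inflections pd_list_ip (n_inflections pd_list_ip)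

-- ===== LEMMAS AND PROOFS =====

-- the sign-change test over Int indices, as used to characterise A
def pvQb (xs : List Int) (j : Int) : Bool :=
  pvSign (PySem.List.pyGetD xs j 0) != pvSign (PySem.List.pyGetD xs (j - 1) 0)

-- A's four-way branch is the sign-change test
theorem branch_eq_sign (a b : Int) (acc : List Int) (i : Int) :
    (if a ≠ 0 ∧ b = 0 then acc ++ [i]
     else if a = 0 ∧ b ≠ 0 then acc ++ [i]
     else if a < 0 ∧ b > 0 then acc ++ [i]
     else if a > 0 ∧ b < 0 then acc ++ [i]
     else acc)
    = (if pvSign b != pvSign a then acc ++ [i] else acc) := by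
  simp only [bne_iff_ne]
  unfold pvSign
  split_ifs <;> first | rfl | omega

-- A equals the filter of the sign-change test over range(1, n)
theorem A_eq_filter (xs : List Int) :
    n_inflections xs = (PySem.List.pyRange 1 xs.length 1).filter (pvQb xs) := by
  unfold n_inflections
  refine Eq.trans (PySem.List.foldl_congr_mem _ _
      (fun pat i => if pvQb xs i then pat ++ [i] else pat) []
      (fun acc i _ =>
        branch_eq_sign (PySem.List.pyGetD xs (i - 1) 0) (PySem.List.pyGetD xs i 0) acc i)) ?_
  simpa using PySem.List.foldl_append_if_eq_filter (pvQb xs) (PySem.List.pyRange 1 xs.length 1) []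

theorem pvSkip_spec (xs : List Int) (s : Int) (i : Nat) :
    pvSkip xs s i ≤ max i xs.length ∧
    (∀ k, i ≤ k → k < pvSkip xs s i → pvSign (xs.getD k 0) = s) ∧
    (pvSkip xs s i < xs.length → pvSign (xs.getD (pvSkip xs s i) 0) ≠ s) := by
  fun_induction pvSkip with
  | case1 i h ih =>
    refine ⟨by omega, ?_, ih.2.2⟩
    intro k hk1 hk2
    rcases Nat.eq_or_lt_of_le hk1 with rfl | h'
    · exact h.2
    · exact ih.2.1 k h' hk2
  | case2 i h =>
    refine ⟨by omega, by omega, ?_⟩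
    intro hlt
    by_contra he
    exact h ⟨hlt, he⟩

-- pyGetD at a nonnegative in-range Int index is getD at the Nat index
theorem pyGetD_nat (xs : List Int) (k : Nat) (hk : k < xs.length) :
    PySem.List.pyGetD xs (k : Int) 0 = xs.getD k 0 := by
  rw [PySem.List.pyGetD_eq_getElem xs 0 (Int.natCast_nonneg k) (by exact_mod_cast hk)]
  simp [List.getD_eq_getElem?_getD, List.getElem?_eq_getElem hk]

-- a run contributes nothing to the filter
theorem filter_run_nil (xs : List Int) (s : Int) (i j : Nat)
    (hij : i + 1 ≤ j) (hjn : j ≤ xs.length)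
    (hs : ∀ k : Nat, i ≤ k → k < j → pvSign (xs.getD k 0) = s) :
    (PySem.List.pyRange ((i : Int) + 1) (j : Int) 1).filter (pvQb xs) = [] := by
  rw [List.filter_eq_nil_iff]
  intro m hm
  rw [PySem.List.mem_pyRange_one] at hm
  obtain ⟨hm1, hm2⟩ := hm
  set k : Nat := m.toNat with hk
  have hmk : m = (k : Int) := by omega
  have hk1 : i + 1 ≤ k := by omega
  have hk2 : k < j := by omega
  have e1 : PySem.List.pyGetD xs m 0 = xs.getD k 0 := by rw [hmk, pyGetD_nat xs k (by omega)]
  have e2 : PySem.List.pyGetD xs (m - 1) 0 = xs.getD (k - 1) 0 := by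
    have : m - 1 = ((k - 1 : Nat) : Int) := by omega
    rw [this, pyGetD_nat xs (k - 1) (by omega)]
  simp only [pvQb, e1, e2, hs k (by omega) hk2, hs (k - 1) (by omega) (by omega),
    bne_self_eq_false, Bool.false_eq_true, not_false_eq_true]

-- main invariant: from a position i inside the list, pvGo collects exactly the
-- sign-change indices of range(i+1, n)
theorem pvGo_eq_filter (xs : List Int) (i : Nat) (hi : i < xs.length) :
    pvGo xs i = (PySem.List.pyRange ((i : Int) + 1) xs.length 1).filter (pvQb xs) := by
  fun_induction pvGo with
  | case1 i h s j h2 ih =>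
    -- j < n : the run ends inside the list, its boundary is recorded
    obtain ⟨hle, hrun, hstop⟩ := pvSkip_spec xs s (i + 1)
    have hij : i + 1 ≤ j := pvSkip_le xs s (i + 1)
    have hjn : j ≤ xs.length := by omega
    rw [PySem.List.pyRange_one_append ((i : Int) + 1) (j : Int) (xs.length : Int)
        (by exact_mod_cast hij) (by exact_mod_cast hjn), List.filter_append]
    have hrun' : ∀ k : Nat, i ≤ k → k < j → pvSign (xs.getD k 0) = s := by
      intro k hk1 hk2
      rcases Nat.eq_or_lt_of_le hk1 with rfl | h'
      · rfl
      · exact hrun k h' hk2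
    rw [filter_run_nil xs s i j hij hjn hrun', List.nil_append]
    have hQj : pvQb xs (j : Int) = true := by
      have e1 : PySem.List.pyGetD xs (j : Int) 0 = xs.getD j 0 := pyGetD_nat xs j h2
      have e2 : PySem.List.pyGetD xs ((j : Int) - 1) 0 = xs.getD (j - 1) 0 := by
        have : (j : Int) - 1 = ((j - 1 : Nat) : Int) := by omega
        rw [this, pyGetD_nat xs (j - 1) (by omega)]
      simp only [pvQb, e1, e2, hrun' (j - 1) (by omega) (by omega), bne_iff_ne, ne_eq]
      intro hc
      exact hstop h2 hc
    rw [PySem.List.pyRange_one_cons (by exact_mod_cast h2)]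
    rw [List.filter_cons_of_pos hQj, ih h2]
  | case2 i h s j h2 =>
    -- j = n : the last run reaches the end, nothing more to record
    obtain ⟨hle, hrun, hstop⟩ := pvSkip_spec xs s (i + 1)
    have hjn : j = xs.length := by
      have := pvSkip_le xs s (i + 1)
      omega
    have hrun' : ∀ k : Nat, i ≤ k → k < j → pvSign (xs.getD k 0) = s := by
      intro k hk1 hk2
      rcases Nat.eq_or_lt_of_le hk1 with rfl | h'
      · rfl
      · exact hrun k h' hk2
    have hij : i + 1 ≤ j := pvSkip_le xs s (i + 1)
    rw [show (xs.length : Int) = ((j : Nat) : Int) by rw [hjn],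
        filter_run_nil xs s i j hij (by omega) hrun']
  | case3 i h => omega

theorem n_inflections_spec_aux (xs : List Int) : n_inflections xs = n_inflections_alt xs := by
  rw [A_eq_filter]
  unfold n_inflections_alt
  rcases Nat.eq_zero_or_pos xs.length with hz | hp
  · rw [PySem.List.pyRange_one_eq_nil (by omega)]
    unfold pvGo
    rw [dif_neg (by omega)]
    rfl
  · rw [pvGo_eq_filter xs 0 hp]
    norm_num

-- ===== VERDICT (by name: the statement is the Claim_ definition above) =====
theorem n_inflections_spec : Claim_equal_n_inflections := fun xs _ => n_inflections_spec_aux xs
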